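-- pv_equiv track=rewrite | github.com/angeolson/Capstone | EDA.py | versesRhymeTransform
-- ===== SOURCE A (Python) =====
-- def versesRhymeTransform(verses_transformed):
--     '''
--     splits a verse line by line while removing excess space, punctuation, for use in determining rhyme structure
--     :param verses_transformed: 'verses_transformed' column of dataframe
--     :return: song split line by line, not by verses.
--     '''
--     typedict = {'verse': '<VERSE>',
--                 'chorus': '<CHORUS>',
--                 'pre chorus': '<PRECHORUS>',
--                 'bridge': '<BRIDGE>',
--                 'outro': '<OUTRO>',
--                 'intro': '<INTRO>',
--                 'refrain': '<REFRAIN>',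
--                 'hook': '<HOOK>',
--                 'post chorus': '<POSTCHORUS>',
--                 'other': '<OTHER>'
--                 }
--     punctuation_spaces = ['(', '[', '.', '(', ')', '!', '?', ',', ':', ';', '/', '-', ']', ')', ' ', '']
--     result = [item for item in verses_transformed if item not in typedict.values()]
--     result = split_list([item for item in result if item not in punctuation_spaces],'<NEWLINE>')
--     return result
--
-- def split_list(input_list,seperator):
--     '''
--     taken from https://stackoverflow.com/questions/30538436/how-to-to-split-a-list-at-a-certain-value
--     :param input_list:
--     :param seperator:
--     :return:
--     '''
--     outer = []
--     inner = []
--     for elem in input_list: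
--         if elem == seperator:
--             if inner:
--                 outer.append(inner)
--             inner = []
--         else:
--             inner.append(elem)
--     if inner:
--         outer.append(inner)
--     return outer
-- ===== SOURCE B (Python) =====
-- def versesRhymeTransform(verses_transformed):
--     '''
--     splits a verse line by line while removing excess space, punctuation, for use in determining rhyme structure
--     :param verses_transformed: 'verses_transformed' column of dataframe
--     :return: song split line by line, not by verses.
--     '''
--     skip = {'<VERSE>', '<CHORUS>', '<PRECHORUS>', '<BRIDGE>', '<OUTRO>',
--             '<INTRO>', '<REFRAIN>', '<HOOK>', '<POSTCHORUS>', '<OTHER>',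
--             '(', '[', '.', ')', '!', '?', ',', ':', ';', '/', '-', ']', ' ', ''}
--     outer = []
--     group = []
--     for item in verses_transformed:
--         if item in skip:
--             continue
--         if item == '<NEWLINE>':
--             if group:
--                 outer.append(group)
--                 group = []
--         else:
--             group.append(item)
--     if group:
--         outer.append(group)
--     return outer
-- ===== Notes on version B (the rewrite author's own statement) =====
-- stated objective: simpler
-- what changed: Replaced two filtering comprehensions plus a separate split_list helper (three passes over the data) with one fused loop that skips marker/punctuation tokens (kept in a set) and splits on '<NEWLINE>' while maintaining the current group.
import Mathlib
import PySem

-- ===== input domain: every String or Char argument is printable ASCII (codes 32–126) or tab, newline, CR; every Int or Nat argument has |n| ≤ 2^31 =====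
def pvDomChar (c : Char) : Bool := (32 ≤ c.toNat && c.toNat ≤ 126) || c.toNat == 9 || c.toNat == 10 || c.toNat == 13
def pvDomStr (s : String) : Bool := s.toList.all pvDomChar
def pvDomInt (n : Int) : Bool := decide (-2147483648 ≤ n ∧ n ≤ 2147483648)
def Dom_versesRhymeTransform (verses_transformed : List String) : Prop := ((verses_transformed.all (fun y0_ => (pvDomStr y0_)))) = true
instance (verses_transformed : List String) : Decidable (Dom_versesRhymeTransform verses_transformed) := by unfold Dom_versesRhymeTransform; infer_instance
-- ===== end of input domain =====

-- B fuses A's two filtering comprehensions and the split_list helper into one pass; objective: simpler.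

-- ===== PORT A =====
def pvTypedictValues : List String :=
  ["<VERSE>", "<CHORUS>", "<PRECHORUS>", "<BRIDGE>", "<OUTRO>",
   "<INTRO>", "<REFRAIN>", "<HOOK>", "<POSTCHORUS>", "<OTHER>"]

def pvPunctuationSpaces : List String :=
  ["(", "[", ".", "(", ")", "!", "?", ",", ":", ";", "/", "-", "]", ")", " ", ""]

-- port of the Python helper split_list: a fold over (outer, inner), then a final flush
def splitList (input_list : List String) (seperator : String) : List (List String) :=
  let st := input_list.foldl
    (fun (acc : List (List String) × List String) elem =>
      if elem == seperator then
        (if acc.2 ≠ [] then acc.1 ++ [acc.2] else acc.1, [])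
      else
        (acc.1, acc.2 ++ [elem]))
    ([], [])
  if st.2 ≠ [] then st.1 ++ [st.2] else st.1

def versesRhymeTransform (verses_transformed : List String) : List (List String) :=
  let result := verses_transformed.filter (fun item => !(pvTypedictValues.contains item))
  splitList (result.filter (fun item => !(pvPunctuationSpaces.contains item))) "<NEWLINE>"

-- ===== PORT B =====
def pvSkipSet : List String :=
  ["<VERSE>", "<CHORUS>", "<PRECHORUS>", "<BRIDGE>", "<OUTRO>",
   "<INTRO>", "<REFRAIN>", "<HOOK>", "<POSTCHORUS>", "<OTHER>",
   "(", "[", ".", ")", "!", "?", ",", ":", ";", "/", "-", "]", " ", ""]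

-- one fused pass: `group` is the current line being built
def vrtGo : List String → List String → List (List String)
  | [], group => if group ≠ [] then [group] else []
  | item :: rest, group =>
    if pvSkipSet.contains item then vrtGo rest group
    else if item == "<NEWLINE>" then
      (if group ≠ [] then group :: vrtGo rest [] else vrtGo rest [])
    else vrtGo rest (group ++ [item])

def versesRhymeTransform_alt (verses_transformed : List String) : List (List String) :=
  vrtGo verses_transformed []

-- ===== PRECONDITION & SPEC =====
def Spec_versesRhymeTransform (verses_transformed : List String) (out : List (List String)) : Prop := out = versesRhymeTransform_alt verses_transformed
instance (verses_transformed : List String) (out : List (List String)) : Decidable (Spec_versesRhymeTransform verses_transformed out) := by unfold Spec_versesRhymeTransform; infer_instance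

-- ===== CLAIM (what is proved, stated in full; the proofs are below) =====
def Claim_equal_versesRhymeTransform : Prop := ∀ (verses_transformed : List String), Dom_versesRhymeTransform verses_transformed → Spec_versesRhymeTransform verses_transformed (versesRhymeTransform verses_transformed)

-- ===== LEMMAS AND PROOFS =====

-- proof-only helpers naming the pieces of A's computation
def vrtKeepA (xs : List String) : List String :=
  (xs.filter (fun item => !(pvTypedictValues.contains item))).filter
    (fun item => !(pvPunctuationSpaces.contains item))

def vrtStepA (acc : List (List String) × List String) (elem : String) :
    List (List String) × List String :=
  if elem == "<NEWLINE>" then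
    (if acc.2 ≠ [] then acc.1 ++ [acc.2] else acc.1, [])
  else
    (acc.1, acc.2 ++ [elem])

def vrtFinish (st : List (List String) × List String) : List (List String) :=
  if st.2 ≠ [] then st.1 ++ [st.2] else st.1

theorem vrt_skip_iff (x : String) :
    x ∈ pvSkipSet ↔ x ∈ pvTypedictValues ∨ x ∈ pvPunctuationSpaces := by
  simp only [pvSkipSet, pvTypedictValues, pvPunctuationSpaces, List.mem_cons,
    List.not_mem_nil, or_false]
  tauto

theorem vrt_keepA_cons_skip (x : String) (rest : List String) (h : x ∈ pvSkipSet) :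
    vrtKeepA (x :: rest) = vrtKeepA rest := by
  rcases (vrt_skip_iff x).mp h with h1 | h1
  · simp [vrtKeepA, h1]
  · by_cases h2 : x ∈ pvTypedictValues <;> simp [vrtKeepA, h1, h2]

theorem vrt_keepA_cons_keep (x : String) (rest : List String) (h : x ∉ pvSkipSet) :
    vrtKeepA (x :: rest) = x :: vrtKeepA rest := by
  have ht : x ∉ pvTypedictValues := fun hh => h ((vrt_skip_iff x).mpr (Or.inl hh))
  have hp : x ∉ pvPunctuationSpaces := fun hh => h ((vrt_skip_iff x).mpr (Or.inr hh))
  simp [vrtKeepA, ht, hp]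

theorem vrt_main (xs : List String) (outer : List (List String)) (group : List String) :
    vrtFinish (List.foldl vrtStepA (outer, group) (vrtKeepA xs)) = outer ++ vrtGo xs group := by
  induction xs generalizing outer group with
  | nil =>
    simp only [vrtKeepA, List.filter_nil, List.foldl_nil, vrtGo, vrtFinish]
    split <;> simp
  | cons x rest ih =>
    by_cases hskip : x ∈ pvSkipSet
    · rw [vrt_keepA_cons_skip x rest hskip, ih,
        show vrtGo (x :: rest) group = vrtGo rest group by simp [vrtGo, hskip]]
    · rw [vrt_keepA_cons_keep x rest hskip, List.foldl_cons]
      by_cases hnl : x = "<NEWLINE>"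
      · subst hnl
        by_cases hg : group = []
        · subst hg
          rw [show vrtStepA (outer, ([] : List String)) "<NEWLINE>" = (outer, []) by
              simp [vrtStepA], ih,
            show vrtGo ("<NEWLINE>" :: rest) [] = vrtGo rest [] by simp [vrtGo, hskip]]
        · rw [show vrtStepA (outer, group) "<NEWLINE>" = (outer ++ [group], []) by
              simp [vrtStepA, hg], ih,
            show vrtGo ("<NEWLINE>" :: rest) group = group :: vrtGo rest [] by
              simp [vrtGo, hskip, hg]]
          simp
      · rw [show vrtStepA (outer, group) x = (outer, group ++ [x]) by
            simp [vrtStepA, hnl], ih,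
          show vrtGo (x :: rest) group = vrtGo rest (group ++ [x]) by
            simp [vrtGo, hskip, hnl]]

-- ===== VERDICT (by name: the statement is the Claim_ definition above) =====
theorem versesRhymeTransform_spec : Claim_equal_versesRhymeTransform := by
  intro xs _
  show versesRhymeTransform xs = versesRhymeTransform_alt xs
  have h : versesRhymeTransform xs = vrtFinish (List.foldl vrtStepA ([], []) (vrtKeepA xs)) := rfl
  rw [h, vrt_main xs [] []]
  rfl
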